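-- pv_equiv track=rewrite | github.com/andriy-pro/audit-friendly-bingo-generator | src/bingo_gen/constraints.py | check_row_internal_distance
-- ===== SOURCE A (Python) =====
-- from typing import List
--
-- def check_row_internal_distance(row: List[int], min_distance: int) -> bool:
--     """Check distances between all pairs in a single row.
--
--     Returns True if all pairs satisfy min_distance, False otherwise.
--     """
--     if min_distance <= 0:
--         return True
--
--     for i in range(len(row)):
--         for j in range(i + 1, len(row)):
--             if abs(row[i] - row[j]) < min_distance:
--                 return False
--     return True
-- ===== SOURCE B (Python) =====
-- def check_row_internal_distance(row, min_distance):
--     """Check distances between all pairs in a single row.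
--
--     Returns True if all pairs satisfy min_distance, False otherwise.
--     """
--     if min_distance <= 0:
--         return True
--     s = sorted(row)
--     return all(b - a >= min_distance for a, b in zip(s, s[1:]))
-- ===== Notes on version B (the rewrite author's own statement) =====
-- stated objective: alternative
-- what changed: Replaces the all-pairs nested-loop scan by sorting the row once and checking only adjacent differences against min_distance; asymptotically O(n log n) vs O(n^2) in the worst case, but A's early exit makes it at least as fast on random inputs, so no speed is claimed.
import Mathlib
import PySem

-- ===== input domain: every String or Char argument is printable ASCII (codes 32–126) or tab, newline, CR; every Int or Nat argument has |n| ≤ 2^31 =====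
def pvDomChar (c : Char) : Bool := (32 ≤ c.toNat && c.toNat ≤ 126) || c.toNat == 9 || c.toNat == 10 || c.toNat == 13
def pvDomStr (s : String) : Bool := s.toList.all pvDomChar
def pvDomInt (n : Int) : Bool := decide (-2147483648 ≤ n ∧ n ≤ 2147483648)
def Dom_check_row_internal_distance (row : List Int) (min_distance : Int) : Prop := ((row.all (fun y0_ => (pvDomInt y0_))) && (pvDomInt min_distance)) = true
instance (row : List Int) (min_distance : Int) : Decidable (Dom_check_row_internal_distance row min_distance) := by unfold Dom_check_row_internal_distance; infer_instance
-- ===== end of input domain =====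

-- B sorts the row once and checks only adjacent differences instead of A's all-pairs scan (alternative algorithm; no speed claimed).

-- ===== PORT A =====
-- nested for-loops over indices with early `return False` → nested short-circuiting `all` over the index ranges
def check_row_internal_distance (row : List Int) (min_distance : Int) : Bool :=
  if min_distance ≤ 0 then true
  else
    (List.range row.length).all fun i =>
      (List.range' (i + 1) (row.length - (i + 1))).all fun j =>
        !(|row.getD i 0 - row.getD j 0| < min_distance)

-- ===== PORT B =====
-- `all(b - a >= min_distance for a, b in zip(s, s[1:]))` as structural recursion over consecutive pairs
def adjacentGapsOk (min_distance : Int) : List Int → Bool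
  | [] => true
  | [_] => true
  | a :: b :: rest => (min_distance ≤ b - a) && adjacentGapsOk min_distance (b :: rest)

def check_row_internal_distance_alt (row : List Int) (min_distance : Int) : Bool :=
  if min_distance ≤ 0 then true
  else adjacentGapsOk min_distance (PySem.List.sorted row (fun x => x) false)

-- ===== PRECONDITION & SPEC =====
def Spec_check_row_internal_distance (row : List Int) (min_distance : Int) (out : Bool) : Prop := out = check_row_internal_distance_alt row min_distance
instance (row : List Int) (min_distance : Int) (out : Bool) : Decidable (Spec_check_row_internal_distance row min_distance out) := by unfold Spec_check_row_internal_distance; infer_instance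

-- ===== CLAIM (what is proved, stated in full; the proofs are below) =====
def Claim_equal_check_row_internal_distance : Prop := ∀ (row : List Int) (min_distance : Int), Dom_check_row_internal_distance row min_distance → Spec_check_row_internal_distance row min_distance (check_row_internal_distance row min_distance)

-- ===== LEMMAS AND PROOFS =====

-- A = true ↔ every index pair i < j is at distance ≥ min_distance, i.e. Pairwise
theorem portA_iff_pairwise (row : List Int) (md : Int) (h : ¬ md ≤ 0) :
    check_row_internal_distance row md = true ↔
      row.Pairwise (fun a b => md ≤ |a - b|) := by
  rw [check_row_internal_distance, if_neg h, List.pairwise_iff_getElem]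
  simp only [List.all_eq_true, List.mem_range, List.mem_range'_1]
  constructor
  · intro H i j hi hj hij
    have hmem : i + 1 ≤ j ∧ j < i + 1 + (row.length - (i + 1)) := by omega
    have := H i hi j hmem
    simp only [Bool.not_eq_eq_eq_not, Bool.not_true, decide_eq_false_iff_not, not_lt] at this
    rwa [List.getD_eq_getElem _ _ hi, List.getD_eq_getElem _ _ hj] at this
  · intro H i hi j hj
    obtain ⟨h1, h2⟩ := hj
    have hj' : j < row.length := by omega
    have := H i j hi hj' (by omega)
    simp only [Bool.not_eq_eq_eq_not, Bool.not_true, decide_eq_false_iff_not, not_lt]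
    rwa [List.getD_eq_getElem _ _ hi, List.getD_eq_getElem _ _ hj']

-- B's adjacent-gap recursion ↔ IsChain on consecutive elements
theorem adjacentGapsOk_iff_chain (md : Int) (s : List Int) :
    adjacentGapsOk md s = true ↔ s.IsChain (fun a b => md ≤ b - a) := by
  induction s with
  | nil => simp [adjacentGapsOk]
  | cons a t ih =>
    cases t with
    | nil => simp [adjacentGapsOk]
    | cons b rest =>
      rw [adjacentGapsOk, Bool.and_eq_true, List.isChain_cons_cons, ih]
      simp

-- on a sorted list, adjacent gaps ≥ md ↔ all pairwise distances ≥ md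
theorem chain_iff_pairwise_of_sorted (md : Int) :
    ∀ s : List Int, s.Pairwise (· ≤ ·) →
      (s.IsChain (fun a b => md ≤ b - a) ↔ s.Pairwise (fun a b => md ≤ |a - b|)) := by
  intro s
  induction s with
  | nil => intro _; simp
  | cons a t ih =>
    intro hs
    rw [List.pairwise_cons] at hs
    obtain ⟨hle, hst⟩ := hs
    cases t with
    | nil => simp
    | cons c rest =>
      rw [List.isChain_cons_cons, List.pairwise_cons, ih hst]
      constructor
      · rintro ⟨hac, htail⟩
        refine ⟨?_, htail⟩
        intro b hb
        have hcb : c ≤ b := by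
          cases hb with
          | head => exact le_refl _
          | tail _ hb' =>
            rw [List.pairwise_cons] at hst
            exact hst.1 b hb'
        have hab : a ≤ b := hle b hb
        rw [abs_sub_comm, abs_of_nonneg (by omega)]
        omega
      · rintro ⟨hhead, htail⟩
        refine ⟨?_, htail⟩
        have := hhead c List.mem_cons_self
        have hac : a ≤ c := hle c List.mem_cons_self
        rw [abs_sub_comm, abs_of_nonneg (by omega)] at this
        omega

-- ===== VERDICT (by name: the statement is the Claim_ definition above) =====
theorem check_row_internal_distance_spec : Claim_equal_check_row_internal_distance := by
  intro row md _
  unfold Spec_check_row_internal_distance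
  by_cases h : md ≤ 0
  · rw [check_row_internal_distance, check_row_internal_distance_alt, if_pos h, if_pos h]
  · rw [check_row_internal_distance_alt, if_neg h]
    have hperm : (PySem.List.sorted row (fun x => x) false).Perm row := PySem.List.sorted_perm ..
    have hsorted : (PySem.List.sorted row (fun x => x) false).Pairwise (· ≤ ·) := by
      have := PySem.List.sorted_pairwise (xs := row) (key := fun x : Int => x)
      simpa using this
    have hsym : ∀ {a b : Int}, md ≤ |a - b| → md ≤ |b - a| := fun {a b} hab => by
      rwa [abs_sub_comm]
    rw [Bool.eq_iff_iff, portA_iff_pairwise row md h, adjacentGapsOk_iff_chain,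
        chain_iff_pairwise_of_sorted md _ hsorted,
        hperm.pairwise_iff hsym]
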